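-- pv_equiv track=rewrite | github.com/Dylaran/FileFormatConversions | file_format_conversion.py | write_csv_string
-- ===== SOURCE A (Python) =====
-- def write_csv_string(data):
--     """
--     Takes a data object (created by one of the read_*_string functions).
--     Returns a string in the CSV format.
--     """
--
--     multiline = ""
--
--     counter = 0
--     for d in data:
--         key = ""
--         value = ""
--         for k, v in d.items():
--             key += (str(k) + ",")
--             value += (str(v) + ",")
--
--         key = key[:-1]
--         value = value[:-1]
--         if counter == 0:
--             multiline += key + '\n'
--             multiline += value + '\n'
--         else:
--             multiline += value + '\n'
--
--         counter += 1
--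
--     return multiline
-- ===== SOURCE B (Python) =====
-- def write_csv_string(data):
--     """Same output as A; simpler: header pulled out of the loop, one uniform value-line pass, no counter."""
--     if not data:
--         return ""
--     header = ",".join(str(k) for k in data[0].keys())
--     value_lines = [",".join(str(v) for v in d.values()) for d in data]
--     return "\n".join([header] + value_lines) + "\n"
-- ===== Notes on version B (the rewrite author's own statement) =====
-- stated objective: simpler
-- what changed: B hoists the header out of the loop and drops the running counter/branch: it builds the header from the first record, maps every record to its value line in one uniform pass, and joins everything with newlines.
import Mathlib
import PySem

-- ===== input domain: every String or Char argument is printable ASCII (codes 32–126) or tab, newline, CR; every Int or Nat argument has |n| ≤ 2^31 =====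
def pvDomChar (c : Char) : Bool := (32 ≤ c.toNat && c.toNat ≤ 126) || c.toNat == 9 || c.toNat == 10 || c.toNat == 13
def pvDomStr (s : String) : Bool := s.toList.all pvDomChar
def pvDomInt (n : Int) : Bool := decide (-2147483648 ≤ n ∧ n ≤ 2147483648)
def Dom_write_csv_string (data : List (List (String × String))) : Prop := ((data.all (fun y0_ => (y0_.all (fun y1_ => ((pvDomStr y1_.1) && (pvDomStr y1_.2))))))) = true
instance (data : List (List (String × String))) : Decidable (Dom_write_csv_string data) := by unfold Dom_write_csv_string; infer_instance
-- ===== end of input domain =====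

-- B simplifies A's single counter-driven loop: the header is pulled from the first record outside
-- the loop, every record's value line is built in one uniform pass, and the lines are joined.
-- Equivalence of the return value is proved on the whole domain.

-- ===== PORT A =====
-- inner loop of A: key/value accumulation 'key += str(k)+"," ; value += str(v)+","'
def pvA_row (d : List (String × String)) : List Char × List Char :=
  d.foldl (fun p q => (p.1 ++ q.1.toList ++ [','], p.2 ++ q.2.toList ++ [','])) ([], [])

-- one iteration of A's outer loop over (multiline, counter)
def pvA_step (st : List Char × Int) (d : List (String × String)) : List Char × Int :=
  let kv := pvA_row d
  let key := PySem.List.slice kv.1 none (some (-1))      -- key[:-1]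
  let value := PySem.List.slice kv.2 none (some (-1))    -- value[:-1]
  if st.2 == 0 then (st.1 ++ (key ++ ['\n']) ++ (value ++ ['\n']), st.2 + 1)
  else (st.1 ++ (value ++ ['\n']), st.2 + 1)

def write_csv_string (data : List (List (String × String))) : String :=
  String.ofList (data.foldl pvA_step ([], 0)).1

-- ===== PORT B =====
def write_csv_string_alt (data : List (List (String × String))) : String :=
  match data with
  | [] => ""
  | first :: _ =>
    let header := PySem.Chars.join [','] (first.map (fun p => p.1.toList))
    let valueLines := data.map (fun d => PySem.Chars.join [','] (d.map (fun p => p.2.toList)))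
    String.ofList (PySem.Chars.join ['\n'] (header :: valueLines) ++ ['\n'])

-- ===== PRECONDITION & SPEC =====
def Spec_write_csv_string (data : List (List (String × String))) (out : String) : Prop := out = write_csv_string_alt data
instance (data : List (List (String × String))) (out : String) : Decidable (Spec_write_csv_string data out) := by unfold Spec_write_csv_string; infer_instance

-- ===== CLAIM (what is proved, stated in full; the proofs are below) =====
def Claim_equal_write_csv_string : Prop := ∀ (data : List (List (String × String))), Dom_write_csv_string data → Spec_write_csv_string data (write_csv_string data)

-- ===== LEMMAS AND PROOFS =====

-- ",".join(map f l) ++ "," as the concatenation of c-terminated pieces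
lemma flatten_concat_eq_join {α : Type} (c : Char) (f : α → List Char) (l : List α) (h : l ≠ []) :
    (l.map (fun x => f x ++ [c])).flatten = PySem.Chars.join [c] (l.map f) ++ [c] := by
  induction l with
  | nil => exact absurd rfl h
  | cons a t ih =>
    cases t with
    | nil => simp [PySem.Chars.join_singleton]
    | cons b u =>
      have ih' := ih (by simp)
      simp only [List.map_cons, List.flatten_cons] at ih'
      simp only [List.map_cons, List.flatten_cons, PySem.Chars.join_cons_cons, List.append_assoc, List.singleton_append]
      simp only [List.append_assoc, List.singleton_append] at ih'
      rw [ih']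
      simp

lemma dropLast_flatten_eq_join {α : Type} (c : Char) (f : α → List Char) (l : List α) :
    ((l.map (fun x => f x ++ [c])).flatten).dropLast = PySem.Chars.join [c] (l.map f) := by
  cases l with
  | nil => simp [PySem.Chars.join_nil]
  | cons a t =>
    rw [flatten_concat_eq_join c f (a :: t) (by simp), List.dropLast_concat]

-- id form, right-to-left use on B's final join
lemma join_concat (c : Char) (l : List (List Char)) (h : l ≠ []) :
    PySem.Chars.join [c] l ++ [c] = (l.map (fun x => x ++ [c])).flatten := by
  have h2 := flatten_concat_eq_join c id l h
  simpa using h2.symm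

lemma pvA_row_eq (d : List (String × String)) :
    pvA_row d = ((d.map (fun q => q.1.toList ++ [','])).flatten,
                 (d.map (fun q => q.2.toList ++ [','])).flatten) := by
  unfold pvA_row
  suffices h : ∀ (k v : List Char),
      d.foldl (fun p q => (p.1 ++ q.1.toList ++ [','], p.2 ++ q.2.toList ++ [','])) (k, v)
      = (k ++ (d.map (fun q => q.1.toList ++ [','])).flatten,
         v ++ (d.map (fun q => q.2.toList ++ [','])).flatten) by
    simpa using h [] []
  induction d with
  | nil => simp
  | cons a t ih =>
    intro k v
    rw [List.foldl_cons, ih]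
    simp [List.append_assoc]

-- the value line of one record
def pvVal (d : List (String × String)) : List Char :=
  PySem.Chars.join [','] (d.map (fun p => p.2.toList))

lemma pvA_step_pos (st : List Char × Int) (d : List (String × String)) (h : st.2 ≠ 0) :
    pvA_step st d = (st.1 ++ (pvVal d ++ ['\n']), st.2 + 1) := by
  unfold pvA_step pvVal
  rw [pvA_row_eq]
  simp only [PySem.List.slice_to_neg_one, dropLast_flatten_eq_join]
  rw [if_neg (by simpa using h)]

lemma pvA_foldl_pos (rest : List (List (String × String))) (acc : List Char) (c : Int)
    (hc : 1 ≤ c) :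
    (rest.foldl pvA_step (acc, c)).1
      = acc ++ (rest.map (fun d => pvVal d ++ ['\n'])).flatten := by
  induction rest generalizing acc c with
  | nil => simp
  | cons d t ih =>
    rw [List.foldl_cons, pvA_step_pos (acc, c) d (by omega)]
    simp [ih _ (c + 1) (by omega), List.append_assoc]

-- ===== VERDICT (by name: the statement is the Claim_ definition above) =====
theorem write_csv_string_spec : Claim_equal_write_csv_string := by
  intro data _
  unfold Spec_write_csv_string
  cases data with
  | nil => rfl
  | cons first rest =>
    unfold write_csv_string
    rw [List.foldl_cons]
    have hstep : pvA_step ([], 0) first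
        = ((PySem.Chars.join [','] (first.map (fun p => p.1.toList)) ++ ['\n'])
            ++ (pvVal first ++ ['\n']), 1) := by
      unfold pvA_step pvVal
      rw [pvA_row_eq]
      simp only [PySem.List.slice_to_neg_one, dropLast_flatten_eq_join]
      simp
    rw [hstep, pvA_foldl_pos rest _ 1 (le_refl 1)]
    show _ = write_csv_string_alt (first :: rest)
    simp only [write_csv_string_alt]
    rw [show (PySem.Chars.join [','] (first.map (fun p => p.1.toList))
          :: (first :: rest).map (fun d => PySem.Chars.join [','] (d.map (fun p => p.2.toList))))
        = (PySem.Chars.join [','] (first.map (fun p => p.1.toList))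
          :: (first :: rest).map pvVal) from by simp [pvVal],
      join_concat '\n' _ (by simp)]
    simp [pvVal, Function.comp_def, List.map_map, List.append_assoc]
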